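-- pv_equiv track=rewrite | github.com/sorachang1874/Sourcing-AI-Agent-Dev | sourcing-ai-agent/src/sourcing_agent/public_web_quality.py | _severity_for_issues
-- ===== SOURCE A (Python) =====
-- def _severity_for_issues(issues: list[str]) -> str:
--     high_codes = {
--         "invalid_email_value",
--         "email_missing_source_url",
--         "promotion_recommended_but_not_publishable",
--         "promotion_recommended_but_suppressed",
--         "promotion_recommended_without_trusted_identity",
--         "promotion_recommended_generic_or_unknown_email",
--         "bad_identity_marked_publishable",
--         "profile_link_missing_url",
--     }
--     medium_codes = {
--         "email_missing_source_family",
--         "promotion_recommended_missing_evidence_excerpt",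
--         "profile_link_needs_identity_review",
--         "profile_link_bad_identity",
--         "media_link_without_trusted_identity",
--         "github_repository_or_deep_link_not_profile",
--         "x_link_not_profile",
--         "substack_link_not_profile_or_publication",
--         "scholar_link_not_profile",
--         "non_canonical_profile_link_type",
--         "profile_link_missing_source_domain",
--         "profile_link_missing_source_family",
--     }
--     if any(code in high_codes for code in issues):
--         return "high"
--     if any(code in medium_codes for code in issues):
--         return "medium"
--     if issues:
--         return "low"
--     return "ok"
-- ===== SOURCE B (Python) =====
-- _HIGH = frozenset({
--     "invalid_email_value",
--     "email_missing_source_url",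
--     "promotion_recommended_but_not_publishable",
--     "promotion_recommended_but_suppressed",
--     "promotion_recommended_without_trusted_identity",
--     "promotion_recommended_generic_or_unknown_email",
--     "bad_identity_marked_publishable",
--     "profile_link_missing_url",
-- })
--
-- _MEDIUM = frozenset({
--     "email_missing_source_family",
--     "promotion_recommended_missing_evidence_excerpt",
--     "profile_link_needs_identity_review",
--     "profile_link_bad_identity",
--     "media_link_without_trusted_identity",
--     "github_repository_or_deep_link_not_profile",
--     "x_link_not_profile",
--     "substack_link_not_profile_or_publication",
--     "scholar_link_not_profile",
--     "non_canonical_profile_link_type",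
--     "profile_link_missing_source_domain",
--     "profile_link_missing_source_family",
-- })
--
--
-- def _severity_for_issues(issues: list[str]) -> str:
--     # One pass: accumulate the maximum severity rank seen, then map it back.
--     rank = 0
--     for code in issues:
--         rank = max(rank, 3 if code in _HIGH else 2 if code in _MEDIUM else 1)
--     return ("ok", "low", "medium", "high")[rank]
-- ===== Notes on version B (the rewrite author's own statement) =====
-- stated objective: simpler
-- what changed: Replaced A's two early-returning any-membership scans plus branch chain by one accumulating pass that tracks the maximum numeric severity rank (high=3, medium=2, unknown=1, empty stays 0) and maps the rank back to the string.
import Mathlib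
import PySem

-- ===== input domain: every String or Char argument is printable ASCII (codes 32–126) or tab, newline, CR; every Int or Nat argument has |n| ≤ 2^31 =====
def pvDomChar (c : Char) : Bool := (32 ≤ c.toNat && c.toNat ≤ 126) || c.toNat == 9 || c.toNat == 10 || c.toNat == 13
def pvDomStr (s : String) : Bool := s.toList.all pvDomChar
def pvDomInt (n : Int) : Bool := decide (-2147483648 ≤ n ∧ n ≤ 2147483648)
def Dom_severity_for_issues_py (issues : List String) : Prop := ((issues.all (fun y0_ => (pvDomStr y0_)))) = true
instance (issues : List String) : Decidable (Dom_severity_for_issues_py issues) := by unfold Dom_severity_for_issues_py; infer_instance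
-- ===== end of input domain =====

-- B replaces A's two early-returning membership scans with a single pass
-- accumulating the maximum severity rank; objective: simpler decomposition.

-- ===== PORT A =====
-- the two code sets (set membership ported as list membership over the distinct elements; exact)
def pvHighCodes : List String :=
  ["invalid_email_value", "email_missing_source_url",
   "promotion_recommended_but_not_publishable", "promotion_recommended_but_suppressed",
   "promotion_recommended_without_trusted_identity",
   "promotion_recommended_generic_or_unknown_email",
   "bad_identity_marked_publishable", "profile_link_missing_url"]

def pvMediumCodes : List String :=
  ["email_missing_source_family", "promotion_recommended_missing_evidence_excerpt",
   "profile_link_needs_identity_review", "profile_link_bad_identity",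
   "media_link_without_trusted_identity", "github_repository_or_deep_link_not_profile",
   "x_link_not_profile", "substack_link_not_profile_or_publication",
   "scholar_link_not_profile", "non_canonical_profile_link_type",
   "profile_link_missing_source_domain", "profile_link_missing_source_family"]

def severity_for_issues_py (issues : List String) : String :=
  if issues.any (fun code => pvHighCodes.contains code) then "high"
  else if issues.any (fun code => pvMediumCodes.contains code) then "medium"
  else if !issues.isEmpty then "low"
  else "ok"

-- ===== PORT B =====
-- rank of a single code: 3 if code in _HIGH else 2 if code in _MEDIUM else 1
def pvRankOf (code : String) : Nat :=
  if pvHighCodes.contains code then 3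
  else if pvMediumCodes.contains code then 2
  else 1

def severity_for_issues_py_alt (issues : List String) : String :=
  let rank := issues.foldl (fun r code => max r (pvRankOf code)) 0
  -- tuple indexing ("ok", "low", "medium", "high")[rank] (rank is always ≤ 3)
  match rank with
  | 0 => "ok"
  | 1 => "low"
  | 2 => "medium"
  | _ => "high"

-- ===== PRECONDITION & SPEC =====
def Spec_severity_for_issues_py (issues : List String) (out : String) : Prop := out = severity_for_issues_py_alt issues
instance (issues : List String) (out : String) : Decidable (Spec_severity_for_issues_py issues out) := by unfold Spec_severity_for_issues_py; infer_instance

-- ===== CLAIM (what is proved, stated in full; the proofs are below) =====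
def Claim_equal_severity_for_issues_py : Prop := ∀ (issues : List String), Dom_severity_for_issues_py issues → Spec_severity_for_issues_py issues (severity_for_issues_py issues)

-- ===== LEMMAS AND PROOFS =====

-- the accumulated rank equals A's branch chain read as a number
theorem foldl_rank_eq (l : List String) (acc : Nat) :
    l.foldl (fun r code => max r (pvRankOf code)) acc =
      max acc
        (if l.any (fun code => pvHighCodes.contains code) then 3
         else if l.any (fun code => pvMediumCodes.contains code) then 2
         else if l.isEmpty then 0 else 1) := by
  induction l generalizing acc with
  | nil => simp
  | cons a t ih =>
    simp only [List.foldl_cons, ih, List.any_cons, List.isEmpty_cons]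
    by_cases h1 : pvHighCodes.contains a <;>
      by_cases h2 : pvMediumCodes.contains a <;>
        simp only [pvRankOf, h1, h2, if_true, Bool.true_or, Bool.false_or] <;>
          split_ifs <;> (try omega) <;> simp_all

theorem severity_for_issues_py_spec : Claim_equal_severity_for_issues_py := by
  intro issues _
  unfold Spec_severity_for_issues_py severity_for_issues_py severity_for_issues_py_alt
  simp only [foldl_rank_eq, Nat.zero_max]
  split_ifs <;> simp_all
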